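-- pv_equiv track=rewrite | github.com/gematik/fhir-igs-workflow | scripts/refresh-special-urls.py | remove_special_url_block
-- ===== SOURCE A (Python) =====
-- def remove_special_url_block(block_lines: list[str]) -> list[str]:
--     result: list[str] = []
--     index = 0
--
--     while index < len(block_lines):
--         line = block_lines[index]
--         if line.startswith("  special-url:"):
--             index += 1
--             while index < len(block_lines):
--                 current = block_lines[index]
--                 stripped = current.strip()
--                 if not stripped:
--                     index += 1
--                     continue
--                 if stripped.startswith("#") and current.startswith("    "):
--                     index += 1
--                     continue
--                 if current.startswith("    "):
--                     index += 1
--                     continue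
--                 break
--             continue
--
--         result.append(line)
--         index += 1
--
--     return result
-- ===== SOURCE B (Python) =====
-- def remove_special_url_block(block_lines: list[str]) -> list[str]:
--     def is_marker(line: str) -> bool:
--         return line.startswith("  special-url:")
--
--     def is_cont(line: str) -> bool:
--         # a line the skip loop would swallow: blank, or indented four spaces
--         return not line.strip() or line.startswith("    ")
--
--     # Stage 1: for each position, whether the nearest preceding
--     # non-continuation line (if any) is a special-url marker.
--     governed: list[bool] = []
--     g = False
--     for line in block_lines:
--         governed.append(g)
--         if not is_cont(line):
--             g = is_marker(line)
--
--     # Stage 2: per-line declarative keep predicate, independent of order.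
--     return [line for line, g in zip(block_lines, governed)
--             if not is_marker(line) and not (is_cont(line) and g)]
-- ===== Notes on version B (the rewrite author's own statement) =====
-- stated objective: alternative
-- what changed: Replaces A's nested index-driven skip loops with two staged passes: a scan that labels every line with whether its nearest preceding non-continuation line is a special-url marker, then an order-independent per-line filter over the zipped labels.
import Mathlib
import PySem

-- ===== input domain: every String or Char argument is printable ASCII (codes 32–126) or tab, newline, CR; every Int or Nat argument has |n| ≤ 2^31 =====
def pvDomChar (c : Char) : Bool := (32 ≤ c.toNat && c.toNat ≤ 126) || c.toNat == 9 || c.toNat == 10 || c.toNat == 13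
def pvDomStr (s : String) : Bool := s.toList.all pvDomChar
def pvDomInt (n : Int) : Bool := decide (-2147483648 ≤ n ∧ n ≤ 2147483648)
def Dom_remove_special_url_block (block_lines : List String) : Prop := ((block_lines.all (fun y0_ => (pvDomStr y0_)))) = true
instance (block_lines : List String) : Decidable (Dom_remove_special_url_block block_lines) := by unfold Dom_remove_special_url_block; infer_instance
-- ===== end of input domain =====

-- B replaces A's nested index-driven skip loops with two staged passes: a scan labelling each
-- line with whether its nearest preceding non-continuation line is a marker, then a per-line filter.


-- ===== PORT A =====
-- inner while loop of A: advance past blank / indented-comment / 4-space-indented lines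
def pvSkipA : List String → List String
  | [] => []
  | current :: rest =>
    let stripped := PySem.Str.strip current
    if stripped = "" then pvSkipA rest
    else if PySem.Str.startswith stripped "#" && PySem.Str.startswith current "    " then pvSkipA rest
    else if PySem.Str.startswith current "    " then pvSkipA rest
    else current :: rest

theorem pvSkipA_len : ∀ (xs : List String), (pvSkipA xs).length ≤ xs.length := by
  intro xs
  induction xs with
  | nil => simp [pvSkipA]
  | cons x xs ih =>
    simp only [pvSkipA]
    split_ifs <;> simp <;> omega

-- outer while loop of A, as recursion on the remaining suffix of block_lines
def remove_special_url_block (block_lines : List String) : List String :=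
  match block_lines with
  | [] => []
  | line :: rest =>
    if PySem.Str.startswith line "  special-url:" then
      remove_special_url_block (pvSkipA rest)
    else
      line :: remove_special_url_block rest
termination_by block_lines.length
decreasing_by
  · have := pvSkipA_len rest; simp; omega
  · simp

-- ===== PORT B =====
-- B's helpers
def pvIsMarker (line : String) : Bool := PySem.Str.startswith line "  special-url:"
def pvIsCont (line : String) : Bool := PySem.Str.strip line == "" || PySem.Str.startswith line "    "

-- stage 1 of B: the `governed` list (the loop state g threaded through the for-loop)
def pvGov (g : Bool) : List String → List Bool
  | [] => []
  | line :: rest => g :: pvGov (if !pvIsCont line then pvIsMarker line else g) rest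

-- stage 2 of B: the list comprehension over zip(block_lines, governed)
def pvStage2 (pairs : List (String × Bool)) : List String :=
  pairs.filterMap (fun p => if !pvIsMarker p.1 && !(pvIsCont p.1 && p.2) then some p.1 else none)

def remove_special_url_block_alt (block_lines : List String) : List String :=
  pvStage2 (block_lines.zip (pvGov false block_lines))

-- ===== PRECONDITION & SPEC =====
def Spec_remove_special_url_block (block_lines : List String) (out : List String) : Prop := out = remove_special_url_block_alt block_lines
instance (block_lines : List String) (out : List String) : Decidable (Spec_remove_special_url_block block_lines out) := by unfold Spec_remove_special_url_block; infer_instance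

-- ===== CLAIM =====
def Claim_equal_remove_special_url_block : Prop := ∀ (block_lines : List String), Dom_remove_special_url_block block_lines → Spec_remove_special_url_block block_lines (remove_special_url_block block_lines)

-- ===== LEMMAS AND PROOFS =====

-- rstrip of a list starting with a non-space character is nonempty
theorem pv_rstrip_ne_nil (c : Char) (cs : List Char) (h : PySem.Chars.isspace c = false) :
    PySem.Chars.rstrip (c :: cs) ≠ [] := by
  intro hc
  unfold PySem.Chars.rstrip at hc
  rw [List.reverse_eq_nil_iff, List.dropWhile_eq_nil_iff] at hc
  have := hc c (by simp)
  rw [h] at this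
  exact Bool.false_ne_true this

-- a special-url marker line is never a continuation line (its third character is 's')
theorem pv_marker_not_cont (l : String) (hm : pvIsMarker l = true) : pvIsCont l = false := by
  unfold pvIsMarker at hm
  rw [PySem.Str.startswith_eq, PySem.Chars.startswith_iff] at hm
  obtain ⟨t, ht⟩ := hm
  have hpre : ("  special-url:" : String).toList = [' ', ' ', 's', 'p', 'e', 'c', 'i', 'a', 'l', '-', 'u', 'r', 'l', ':'] := by decide
  rw [hpre] at ht
  unfold pvIsCont
  rw [Bool.or_eq_false_iff]
  constructor
  · -- strip l ≠ ""
    rw [beq_eq_false_iff_ne]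
    intro hs
    have h2 : PySem.Chars.strip l.toList = [] := by
      have := congrArg String.toList hs
      rw [PySem.Str.toList_strip] at this
      simpa using this
    rw [← ht] at h2
    unfold PySem.Chars.strip PySem.Chars.lstrip at h2
    simp only [List.cons_append, List.dropWhile_cons] at h2
    norm_num [PySem.Chars.isspace] at h2
    exact pv_rstrip_ne_nil 's' _ (by decide) h2
  · -- l does not start with four spaces
    rw [Bool.eq_false_iff]
    intro h4
    rw [PySem.Str.startswith_eq, PySem.Chars.startswith_iff] at h4
    have h4pre : ("    " : String).toList = [' ', ' ', ' ', ' '] := by decide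
    rw [h4pre, ← ht] at h4
    simp [List.cons_prefix_cons] at h4

-- the skip loop of A swallows exactly the continuation lines
theorem pvSkipA_cont (l : String) (rest : List String) (h : pvIsCont l = true) :
    pvSkipA (l :: rest) = pvSkipA rest := by
  simp only [pvIsCont, Bool.or_eq_true, beq_iff_eq] at h
  simp only [pvSkipA]
  split_ifs with h1 h2 h3
  · rfl
  · rfl
  · rfl
  · rcases h with h | h
    · exact absurd h h1
    · exact absurd h h3

theorem pvSkipA_stop (l : String) (rest : List String) (h : pvIsCont l = false) :
    pvSkipA (l :: rest) = l :: rest := by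
  simp only [pvIsCont, Bool.or_eq_false_iff, beq_eq_false_iff_ne, ne_eq] at h
  obtain ⟨h1, h2⟩ := h
  rw [Bool.eq_false_iff] at h2
  have h2' : PySem.Str.startswith l "    " = false := Bool.eq_false_iff.mpr h2
  simp only [pvSkipA]
  rw [if_neg h1, if_neg (by rw [h2', Bool.and_false]; exact Bool.false_ne_true),
      if_neg (by rw [h2']; exact Bool.false_ne_true)]

-- cons-step of stage 2
theorem pvStage2_cons (p : String × Bool) (ps : List (String × Bool)) :
    pvStage2 (p :: ps) =
      if !pvIsMarker p.1 && !(pvIsCont p.1 && p.2) then p.1 :: pvStage2 ps else pvStage2 ps := by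
  unfold pvStage2
  rw [List.filterMap_cons]
  cases hb : (!pvIsMarker p.1 && !(pvIsCont p.1 && p.2)) <;> simp

-- A's outer loop, re-stated through B's marker helper (definitionally the same test)
theorem pvA_cons (l : String) (rest : List String) :
    remove_special_url_block (l :: rest) =
      if pvIsMarker l then remove_special_url_block (pvSkipA rest) else l :: remove_special_url_block rest := by
  rw [remove_special_url_block]; rfl

-- both loop states at once: B's pipeline with g=false is A, with g=true it is A after the skip loop
theorem pvB_eq_A : ∀ (ls : List String),
    pvStage2 (ls.zip (pvGov false ls)) = remove_special_url_block ls ∧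
    pvStage2 (ls.zip (pvGov true ls)) = remove_special_url_block (pvSkipA ls) := by
  intro ls
  induction ls with
  | nil => simp [pvStage2, pvGov, pvSkipA, remove_special_url_block]
  | cons l rest ih =>
    obtain ⟨ihf, iht⟩ := ih
    cases hm : pvIsMarker l
    · -- non-marker line
      cases hc : pvIsCont l
      · -- plain content line: kept in either state, governance resets to false
        constructor
        · rw [pvGov, List.zip_cons_cons, pvStage2_cons, pvA_cons]
          simp [hm, hc, ihf]
        · rw [pvGov, List.zip_cons_cons, pvStage2_cons, pvSkipA_stop l rest hc, pvA_cons]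
          simp [hm, hc, ihf]
      · -- continuation line: kept when ungoverned, swallowed when governed
        constructor
        · rw [pvGov, List.zip_cons_cons, pvStage2_cons, pvA_cons]
          simp [hm, hc, ihf]
        · rw [pvGov, List.zip_cons_cons, pvStage2_cons, pvSkipA_cont l rest hc]
          simp [hm, hc, iht]
    · -- marker line: dropped, governance becomes true
      have hc := pv_marker_not_cont l hm
      constructor
      · rw [pvGov, List.zip_cons_cons, pvStage2_cons, pvA_cons]
        simp [hm, hc, iht]
      · rw [pvGov, List.zip_cons_cons, pvStage2_cons, pvSkipA_stop l rest hc, pvA_cons]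
        simp [hm, hc, iht]

-- ===== VERDICT =====
theorem remove_special_url_block_spec : Claim_equal_remove_special_url_block := by
  intro bl _
  unfold Spec_remove_special_url_block remove_special_url_block_alt
  exact (pvB_eq_A bl).1.symm
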